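-- pv_equiv track=rewrite | github.com/Shilenkovv/Algorithms_training_6.0_by_Yandex | week02/g.py | rude
-- ===== SOURCE A (Python) =====
-- def rude(s, n, c):
--     l = r = bestl = bestr = 0
--     d = {"a": 0, "b": 0}
--     cur_rude = 0
--     while r < n:
--         cyl = s[r]
--         d[cyl] = d.get(cyl, 0) + 1
--         if cyl == "b":
--             cur_rude += d["a"]
--         if cur_rude <= c:
--             if r - l >= bestr - bestl:
--                 bestl, bestr = l, r
--         else:
--             while cur_rude > c:
--                 cyl = s[l]
--                 l += 1
--                 if cyl == "a":
--                     cur_rude -= d["b"]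
--                 d[cyl] -= 1
--         r += 1
--
--     return bestr - bestl + 1
-- ===== SOURCE B (Python) =====
-- def rude(s, n, c):
--     t = s[:max(0, n)]
--     # prefix tables over t: pa[i] = #'a' in t[:i], pb[i] = #'b' in t[:i],
--     # pw[i] = sum over 'b'-positions j < i of (#'a' in t[:j])
--     pa = [0]
--     pb = [0]
--     pw = [0]
--     for ch in t:
--         pa.append(pa[-1] + (1 if ch == "a" else 0))
--         pb.append(pb[-1] + (1 if ch == "b" else 0))
--         pw.append(pw[-1] + (pa[-1] if ch == "b" else 0))
--
--     def inv(l, r):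
--         # number of pairs (i, j), l <= i < j < r, t[i]=='a', t[j]=='b'
--         return (pw[r] - pw[l]) - (pb[r] - pb[l]) * pa[l]
--
--     ans = 1
--     for r in range(1, len(t) + 1):
--         # inv(l, r) is non-increasing in l and inv(r-1, r) == 0 <= c:
--         # binary-search the smallest valid l in [0, r-1]
--         lo, hi = 0, r - 1
--         while lo < hi:
--             mid = (lo + hi) // 2
--             if inv(mid, r) <= c:
--                 hi = mid
--             else:
--                 lo = mid + 1
--         if r - lo > ans:
--             ans = r - lo
--     return ans
-- ===== Notes on version B (the rewrite author's own statement) =====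
-- stated objective: alternative
-- what changed: Replaces A's amortized two-pointer sliding window (dict counters updated while shrinking) by three prefix-count tables built once, a closed-form inversion count for any window, and a per-right-endpoint binary search for the smallest valid left endpoint.
import Mathlib
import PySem

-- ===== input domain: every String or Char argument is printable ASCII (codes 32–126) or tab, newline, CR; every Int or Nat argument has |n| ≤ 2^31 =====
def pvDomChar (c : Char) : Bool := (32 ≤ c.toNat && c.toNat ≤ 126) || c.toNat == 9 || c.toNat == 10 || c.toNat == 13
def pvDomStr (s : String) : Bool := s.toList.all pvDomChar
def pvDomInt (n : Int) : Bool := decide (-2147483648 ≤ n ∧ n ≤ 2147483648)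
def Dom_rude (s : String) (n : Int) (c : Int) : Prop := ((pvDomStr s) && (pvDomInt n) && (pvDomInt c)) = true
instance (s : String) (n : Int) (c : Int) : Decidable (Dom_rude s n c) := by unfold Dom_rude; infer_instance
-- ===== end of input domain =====

-- B replaces A's amortized two-pointer scan by prefix-count tables plus a per-endpoint binary
-- search for the smallest valid left end (alternative algorithm; no speed claim).

-- ===== PORT A =====
-- inner `while cur_rude > c` loop; fuel only makes the recursion structural (Python raises
-- IndexError where pyGet? is none / fuel runs out — outside Pre_)
def rudeShrink (cs : List Char) (c : Int) :
    Nat → Int × PySem.Dict Char Int × Int → Int × PySem.Dict Char Int × Int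
  | 0, st => st
  | fuel + 1, (l, d, cur) =>
    if c < cur then
      match PySem.List.pyGet? cs l with
      | none => (l, d, cur)          -- IndexError in Python; unreachable under Pre_
      | some cyl =>
        let l' := l + 1
        let cur' := if cyl = 'a' then cur - d.getD 'b' 0 else cur
        let d' := d.insert cyl (d.getD cyl 0 - 1)
        rudeShrink cs c fuel (l', d', cur')
    else (l, d, cur)

-- one iteration of the outer `while r < n` loop; state (l, bestl, bestr, d, cur_rude)
def rudeStep (cs : List Char) (c : Int)
    (st : Int × Int × Int × PySem.Dict Char Int × Int) (r : Int) :
    Int × Int × Int × PySem.Dict Char Int × Int :=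
  match st with
  | (l, bl, br, d, cur) =>
    match PySem.List.pyGet? cs r with
    | none => st                     -- IndexError in Python; unreachable under Pre_
    | some cyl =>
      let d1 := d.insert cyl (d.getD cyl 0 + 1)
      let cur1 := if cyl = 'b' then cur + d1.getD 'a' 0 else cur
      if cur1 ≤ c then
        if br - bl ≤ r - l then (l, l, r, d1, cur1) else (l, bl, br, d1, cur1)
      else
        match rudeShrink cs c (cs.length + 1) (l, d1, cur1) with
        | (l2, d2, cur2) => (l2, bl, br, d2, cur2)

def rude (s : String) (n : Int) (c : Int) : Int :=
  let cs := s.toList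
  let st := (PySem.List.pyRange 0 n 1).foldl (rudeStep cs c)
      (0, 0, 0, PySem.Dict.ofList [('a', 0), ('b', 0)], 0)
  st.2.2.1 - st.2.1 + 1

-- ===== PORT B =====
-- the `while lo < hi` binary-search loop of Source B (fuel = hi - lo, enough for the halving loop)
def bsearchB (p : Int → Int) (c : Int) : Int → Int → Nat → Int
  | lo, _, 0 => lo
  | lo, hi, fuel + 1 =>
    if lo < hi then
      let mid := PySem.Int.floordiv (lo + hi) 2
      if p mid ≤ c then bsearchB p c lo mid fuel else bsearchB p c (mid + 1) hi fuel
    else lo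

-- one step of the table-building `for ch in t` loop of Source B
def tabStep (acc : List Int × List Int × List Int) (ch : Char) :
    List Int × List Int × List Int :=
  let pa := acc.1
  let pb := acc.2.1
  let pw := acc.2.2
  let pa' := pa ++ [PySem.List.pyGetD pa (-1) 0 + (if ch = 'a' then 1 else 0)]
  let pb' := pb ++ [PySem.List.pyGetD pb (-1) 0 + (if ch = 'b' then 1 else 0)]
  let pw' := pw ++ [PySem.List.pyGetD pw (-1) 0 +
    (if ch = 'b' then PySem.List.pyGetD pa' (-1) 0 else 0)]
  (pa', pb', pw')

-- Source B's local `inv(l, r)` over the three tables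
def invB (pa pb pw : List Int) (l r : Int) : Int :=
  (PySem.List.pyGetD pw r 0 - PySem.List.pyGetD pw l 0) -
    (PySem.List.pyGetD pb r 0 - PySem.List.pyGetD pb l 0) * PySem.List.pyGetD pa l 0

-- one step of the `for r in range(1, len(t)+1)` loop of Source B
def altStep (pa pb pw : List Int) (c : Int) (ans r : Int) : Int :=
  let lo := bsearchB (fun l => invB pa pb pw l r) c 0 (r - 1) (r - 1).toNat
  if ans < r - lo then r - lo else ans

def rude_alt (s : String) (n : Int) (c : Int) : Int :=
  let t := PySem.List.slice s.toList none (some (max 0 n))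
  let tabs := t.foldl tabStep ([0], [0], [0])
  (PySem.List.pyRange 1 (PySem.List.len t + 1) 1).foldl
    (altStep tabs.1 tabs.2.1 tabs.2.2 c) 1

-- ===== PRECONDITION & SPEC =====
-- Pre_ excludes exactly the inputs where A raises: n > len(s) (IndexError reading s[r]),
-- and c < 0 with n ≥ 1 (the shrink loop runs l off the end of s: IndexError).
def Pre_rude (s : String) (n : Int) (c : Int) : Prop :=
  n ≤ (s.toList.length : Int) ∧ (0 ≤ c ∨ n ≤ 0)
instance (s : String) (n : Int) (c : Int) : Decidable (Pre_rude s n c) := by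
  unfold Pre_rude; infer_instance

def pvWitness_rude : String × Int × Int := ("abba", 4, 1)

def Spec_rude (s : String) (n : Int) (c : Int) (out : Int) : Prop := out = rude_alt s n c
instance (s : String) (n : Int) (c : Int) (out : Int) : Decidable (Spec_rude s n c out) := by
  unfold Spec_rude; infer_instance

-- ===== CLAIM (what is proved, stated in full; the proofs are below) =====
def Claim_equal_rude : Prop := ∀ (s : String) (n : Int) (c : Int),
  Dom_rude s n c → Pre_rude s n c → Spec_rude s n c (rude s n c)

-- ===== LEMMAS AND PROOFS =====

-- prefix counts over the effective list t = s[:n]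
def cntA (t : List Char) (i : Nat) : Int := ((t.take i).countP (· = 'a') : Int)
def cntB (t : List Char) (i : Nat) : Int := ((t.take i).countP (· = 'b') : Int)
def wsum (t : List Char) : Nat → Int
  | 0 => 0
  | i + 1 => wsum t i + (if t.getD i ' ' = 'b' then cntA t i else 0)

-- inversions ("ab" pairs) in the window t[l:r]
def invv (t : List Char) (l r : Nat) : Int :=
  (wsum t r - wsum t l) - (cntB t r - cntB t l) * cntA t l

theorem Lmin_ex (t : List Char) (c : Int) (r : Nat) : ∃ l, r ≤ l ∨ invv t l r ≤ c :=
  ⟨r, Or.inl le_rfl⟩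

-- least l with invv t l r ≤ c (when c ≥ 0 it exists below r)
def Lmin (t : List Char) (c : Int) (r : Nat) : Nat := Nat.find (Lmin_ex t c r)

theorem invv_self (t : List Char) (l : Nat) : invv t l l = 0 := by
  simp [invv]

theorem cntA_succ (t : List Char) (i : Nat) (h : i < t.length) :
    cntA t (i + 1) = cntA t i + (if t[i] = 'a' then 1 else 0) := by
  simp only [cntA, List.take_succ, List.getElem?_eq_getElem h, Option.toList_some,
    List.countP_append, List.countP_singleton, Nat.cast_add]
  by_cases hx : t[i] = 'a' <;> simp [hx]

theorem cntB_succ (t : List Char) (i : Nat) (h : i < t.length) :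
    cntB t (i + 1) = cntB t i + (if t[i] = 'b' then 1 else 0) := by
  simp only [cntB, List.take_succ, List.getElem?_eq_getElem h, Option.toList_some,
    List.countP_append, List.countP_singleton, Nat.cast_add]
  by_cases hx : t[i] = 'b' <;> simp [hx]

theorem cntA_mono (t : List Char) {i j : Nat} (h : i ≤ j) : cntA t i ≤ cntA t j := by
  unfold cntA
  have hs : List.Sublist (t.take i) (t.take j) := by
    have : (t.take j).take i = t.take i := by rw [List.take_take, Nat.min_eq_left h]
    rw [← this]
    exact List.take_sublist _ _
  exact_mod_cast List.Sublist.countP_le hs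

theorem cntB_mono (t : List Char) {i j : Nat} (h : i ≤ j) : cntB t i ≤ cntB t j := by
  unfold cntB
  have hs : List.Sublist (t.take i) (t.take j) := by
    have : (t.take j).take i = t.take i := by rw [List.take_take, Nat.min_eq_left h]
    rw [← this]
    exact List.take_sublist _ _
  exact_mod_cast List.Sublist.countP_le hs

theorem invv_succ_r (t : List Char) (l r : Nat) (h : r < t.length) :
    invv t l (r + 1) = invv t l r + (if t[r] = 'b' then cntA t r - cntA t l else 0) := by
  simp only [invv, wsum, cntB_succ t r h, List.getD_eq_getElem t ' ' h]
  by_cases hx : t[r] = 'b' <;> simp [hx] <;> ring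

theorem invv_succ_l (t : List Char) (l r : Nat) (h : l < t.length) :
    invv t (l + 1) r = invv t l r - (if t[l] = 'a' then cntB t r - cntB t (l + 1) else 0) := by
  simp only [invv, wsum, cntA_succ t l h, cntB_succ t l h, List.getD_eq_getElem t ' ' h]
  by_cases ha : t[l] = 'a'
  · simp only [ha]
    simp
    ring
  · by_cases hb : t[l] = 'b' <;> simp [ha, hb] <;> ring

theorem invv_anti (t : List Char) {l l' r : Nat} (h1 : l ≤ l') (h2 : l' ≤ r)
    (h3 : r ≤ t.length) : invv t l' r ≤ invv t l r := by
  induction l', h1 using Nat.le_induction with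
  | base => exact le_rfl
  | succ l' hl' ih =>
    have hstep : invv t (l' + 1) r ≤ invv t l' r := by
      rw [invv_succ_l t l' r (by omega)]
      have := cntB_mono t (show l' + 1 ≤ r from h2)
      split <;> omega
    exact le_trans hstep (ih (by omega))

theorem invv_adj (t : List Char) (l : Nat) (h : l < t.length) : invv t l (l + 1) = 0 := by
  rw [invv_succ_r t l l h, invv_self]; simp

theorem invv_mono_r (t : List Char) {l r : Nat} (h1 : l ≤ r) (h2 : r < t.length) :
    invv t l r ≤ invv t l (r + 1) := by
  rw [invv_succ_r t l r h2]
  have := cntA_mono t h1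
  split <;> omega

-- Lmin facts
theorem Lmin_zero (t : List Char) (c : Int) : Lmin t c 0 = 0 := by
  simp [Lmin]

theorem Lmin_le_of_valid (t : List Char) (c : Int) (r l : Nat) (h : invv t l r ≤ c) :
    Lmin t c r ≤ l := Nat.find_le (Or.inr h)

theorem Lmin_le_pred (t : List Char) (c : Int) (r : Nat) (hc : 0 ≤ c) (hr : 1 ≤ r)
    (hrN : r ≤ t.length) : Lmin t c r ≤ r - 1 := by
  apply Lmin_le_of_valid
  have h0 := invv_adj t (r - 1) (by omega)
  rw [show r - 1 + 1 = r from by omega] at h0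
  omega

theorem Lmin_valid (t : List Char) (c : Int) (r : Nat) (hc : 0 ≤ c) (hr : 1 ≤ r)
    (hrN : r ≤ t.length) : invv t (Lmin t c r) r ≤ c := by
  have h1 := Lmin_le_pred t c r hc hr hrN
  have h2 : r ≤ Lmin t c r ∨ invv t (Lmin t c r) r ≤ c := Nat.find_spec (Lmin_ex t c r)
  rcases h2 with h2 | h2
  · omega
  · exact h2

theorem Lmin_min (t : List Char) (c : Int) (r l : Nat) (hl : l < Lmin t c r) :
    c < invv t l r := by
  have h := Nat.find_min (Lmin_ex t c r) hl
  simp only [not_or, not_le] at h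
  exact h.2

theorem Lmin_mono (t : List Char) (c : Int) (r : Nat) (hc : 0 ≤ c) (hrN : r + 1 ≤ t.length) :
    Lmin t c r ≤ Lmin t c (r + 1) := by
  apply Lmin_le_of_valid
  calc invv t (Lmin t c (r + 1)) r ≤ invv t (Lmin t c (r + 1)) (r + 1) := by
        apply invv_mono_r t _ (by omega)
        exact le_trans (Lmin_le_pred t c (r + 1) hc (by omega) hrN) (by omega)
      _ ≤ c := Lmin_valid t c (r + 1) hc (by omega) hrN

theorem Lmin_le_self (t : List Char) (c : Int) (r : Nat) : Lmin t c r ≤ r :=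
  Nat.find_le (Or.inl le_rfl)

-- A's running best, as a fold: best difference after processing p characters
def Mbest (t : List Char) (c : Int) (p : Nat) : Int :=
  (List.range p).foldl (fun (a : Int) (q : Nat) => max a ((q : Int) - ((Lmin t c (q + 1) : Nat) : Int))) 0

theorem Mbest_succ (t : List Char) (c : Int) (p : Nat) :
    Mbest t c (p + 1) = max (Mbest t c p) ((p : Int) - ((Lmin t c (p + 1) : Nat) : Int)) := by
  rw [Mbest, List.range_succ, List.foldl_append]
  rfl

theorem Mbest_ge (t : List Char) (c : Int) (p q : Nat) (h : q < p) :
    (q : Int) - ((Lmin t c (q + 1) : Nat) : Int) ≤ Mbest t c p :=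
  (PySem.List.le_foldl_max_int (List.range p)
    (fun q : Nat => (q : Int) - ((Lmin t c (q + 1) : Nat) : Int)) 0).2 q (List.mem_range.mpr h)

-- The inner shrink loop lands exactly on the least valid left endpoint
theorem shrink_ok (cs : List Char) (c : Int) (N : Nat) (hN : N ≤ cs.length) (hc : 0 ≤ c)
    (w : Nat) (hw1 : 1 ≤ w) (hwN : w ≤ N) :
    ∀ (fuel l : Nat) (d : PySem.Dict Char Int),
      l ≤ Lmin (cs.take N) c w → Lmin (cs.take N) c w - l ≤ fuel →
      d.getD 'a' 0 = cntA (cs.take N) w - cntA (cs.take N) l →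
      d.getD 'b' 0 = cntB (cs.take N) w - cntB (cs.take N) l →
      ∃ d' : PySem.Dict Char Int,
        rudeShrink cs c fuel ((l : Int), d, invv (cs.take N) l w) =
          ((Lmin (cs.take N) c w : Int), d', invv (cs.take N) (Lmin (cs.take N) c w) w) ∧
        d'.getD 'a' 0 = cntA (cs.take N) w - cntA (cs.take N) (Lmin (cs.take N) c w) ∧
        d'.getD 'b' 0 = cntB (cs.take N) w - cntB (cs.take N) (Lmin (cs.take N) c w) := by
  set t := cs.take N with ht
  have htlen : t.length = N := by
    rw [ht, List.length_take, Nat.min_eq_left hN]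
  intro fuel
  induction fuel with
  | zero =>
    intro l d h1 h2 h3 h4
    have hl : l = Lmin t c w := by omega
    subst hl
    exact ⟨d, rfl, h3, h4⟩
  | succ fuel ih =>
    intro l d h1 h2 h3 h4
    by_cases hcur : c < invv t l w
    · have hlt : l < Lmin t c w := by
        rcases Nat.lt_or_ge l (Lmin t c w) with h | h
        · exact h
        · exfalso
          have hl : l = Lmin t c w := by omega
          rw [hl] at hcur
          exact absurd (Lmin_valid t c w hc hw1 (by omega)) (not_le.mpr hcur)
      have hlN : l < N := by
        have := Lmin_le_pred t c w hc hw1 (by omega)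
        omega
      have hlcs : l < cs.length := by omega
      have hch : t[l]'(by omega) = cs[l]'hlcs := List.getElem_take
      have hget : PySem.List.pyGet? cs ((l : Nat) : Int) = some (t[l]'(by omega)) := by
        rw [PySem.List.pyGet?_natCast, List.getElem?_eq_getElem hlcs]
        exact congrArg some hch.symm
      have hcur' : (if t[l]'(by omega) = 'a' then invv t l w - d.getD 'b' 0 else invv t l w) =
          invv t (l + 1) w := by
        rw [invv_succ_l t l w (by omega), h4]
        by_cases ha : t[l]'(by omega) = 'a'
        · have hb : cntB t (l + 1) = cntB t l := by
            rw [cntB_succ t l (by omega), ha]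
            simp
          rw [if_pos ha, if_pos ha, hb]
        · rw [if_neg ha, if_neg ha]
          ring
      have hda : (d.insert (t[l]'(by omega)) (d.getD (t[l]'(by omega)) 0 - 1)).getD 'a' 0 =
          cntA t w - cntA t (l + 1) := by
        rw [PySem.Dict.getD_insert]
        by_cases ha : t[l]'(by omega) = 'a'
        · rw [if_pos ha.symm, ha, h3, cntA_succ t l (by omega), if_pos ha]
          ring
        · rw [if_neg (fun he => ha he.symm), h3, cntA_succ t l (by omega), if_neg ha]
          ring
      have hdb : (d.insert (t[l]'(by omega)) (d.getD (t[l]'(by omega)) 0 - 1)).getD 'b' 0 =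
          cntB t w - cntB t (l + 1) := by
        rw [PySem.Dict.getD_insert]
        by_cases hb : t[l]'(by omega) = 'b'
        · rw [if_pos hb.symm, hb, h4, cntB_succ t l (by omega), if_pos hb]
          ring
        · rw [if_neg (fun he => hb he.symm), h4, cntB_succ t l (by omega), if_neg hb]
          ring
      have hstep : rudeShrink cs c (fuel + 1) ((l : Int), d, invv t l w) =
          rudeShrink cs c fuel (((l + 1 : Nat) : Int),
            d.insert (t[l]'(by omega)) (d.getD (t[l]'(by omega)) 0 - 1), invv t (l + 1) w) := by
        rw [show rudeShrink cs c (fuel + 1) ((l : Int), d, invv t l w) =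
            (if c < invv t l w then
              match PySem.List.pyGet? cs (l : Int) with
              | none => ((l : Int), d, invv t l w)
              | some cyl =>
                rudeShrink cs c fuel ((l : Int) + 1,
                  d.insert cyl (d.getD cyl 0 - 1),
                  if cyl = 'a' then invv t l w - d.getD 'b' 0 else invv t l w)
            else ((l : Int), d, invv t l w)) from rfl]
        rw [if_pos hcur, hget]
        show rudeShrink cs c fuel ((l : Int) + 1,
            d.insert (t[l]'(by omega)) (d.getD (t[l]'(by omega)) 0 - 1),
            if (t[l]'(by omega)) = 'a' then invv t l w - d.getD 'b' 0 else invv t l w) = _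
        rw [hcur']
        push_cast
        rfl
      rw [hstep]
      exact ih (l + 1) _ (by omega) (by omega) hda hdb
    · have hl : l = Lmin t c w := by
        rcases Nat.lt_or_ge l (Lmin t c w) with h | h
        · exact absurd (Lmin_min t c w l h) hcur
        · omega
      subst hl
      refine ⟨d, ?_, h3, h4⟩
      rw [show rudeShrink cs c (fuel + 1) ((Lmin t c w : Int), d, invv t (Lmin t c w) w) =
          (if c < invv t (Lmin t c w) w then
            match PySem.List.pyGet? cs ((Lmin t c w : Nat) : Int) with
            | none => ((Lmin t c w : Int), d, invv t (Lmin t c w) w)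
            | some cyl =>
              rudeShrink cs c fuel ((Lmin t c w : Int) + 1,
                d.insert cyl (d.getD cyl 0 - 1),
                if cyl = 'a' then invv t (Lmin t c w) w - d.getD 'b' 0
                else invv t (Lmin t c w) w)
          else ((Lmin t c w : Int), d, invv t (Lmin t c w) w)) from rfl]
      rw [if_neg hcur]

-- invariant of A's outer loop after p characters
theorem loop_ok (cs : List Char) (c : Int) (N : Nat) (hN : N ≤ cs.length) (hc : 0 ≤ c) :
    ∀ p, p ≤ N →
      ∃ (bl br : Int) (d' : PySem.Dict Char Int),
        (PySem.List.pyRange 0 (p : Int) 1).foldl (rudeStep cs c)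
            (0, 0, 0, PySem.Dict.ofList [('a', 0), ('b', 0)], 0) =
          ((Lmin (cs.take N) c p : Int), bl, br, d',
            invv (cs.take N) (Lmin (cs.take N) c p) p) ∧
        br - bl = Mbest (cs.take N) c p ∧
        d'.getD 'a' 0 = cntA (cs.take N) p - cntA (cs.take N) (Lmin (cs.take N) c p) ∧
        d'.getD 'b' 0 = cntB (cs.take N) p - cntB (cs.take N) (Lmin (cs.take N) c p) := by
  set t := cs.take N with ht
  have htlen : t.length = N := by
    rw [ht, List.length_take, Nat.min_eq_left hN]
  intro p
  induction p with
  | zero =>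
    intro _
    refine ⟨0, 0, PySem.Dict.ofList [('a', 0), ('b', 0)], ?_, ?_, ?_, ?_⟩
    · rw [show ((0 : Nat) : Int) = 0 from rfl, PySem.List.pyRange_one_eq_nil le_rfl]
      simp [Lmin_zero, invv_self]
    · simp [Mbest]
    · simp [cntA]
      rfl
    · simp [cntB]
      rfl
  | succ p ih =>
    intro hpN
    obtain ⟨bl, br, d', heq, hbest, hda, hdb⟩ := ih (by omega)
    have hcast : ((p + 1 : Nat) : Int) = (p : Int) + 1 := by push_cast; ring
    rw [hcast, PySem.List.pyRange_one_succ_right (show (0 : Int) ≤ (p : Int) by omega), List.foldl_append,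
      heq, List.foldl_cons, List.foldl_nil]
    have hpcs : p < cs.length := by omega
    have hch : t[p]'(by omega) = cs[p]'hpcs := List.getElem_take
    have hget : PySem.List.pyGet? cs ((p : Nat) : Int) = some (t[p]'(by omega)) := by
      rw [PySem.List.pyGet?_natCast, List.getElem?_eq_getElem hpcs]
      exact congrArg some hch.symm
    have hd1a : (d'.insert (t[p]'(by omega)) (d'.getD (t[p]'(by omega)) 0 + 1)).getD 'a' 0 =
        cntA t (p + 1) - cntA t (Lmin t c p) := by
      rw [PySem.Dict.getD_insert]
      by_cases ha : t[p]'(by omega) = 'a'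
      · rw [if_pos ha.symm, ha, hda, cntA_succ t p (by omega), if_pos ha]
        ring
      · rw [if_neg (fun he => ha he.symm), hda, cntA_succ t p (by omega), if_neg ha]
        ring
    have hd1b : (d'.insert (t[p]'(by omega)) (d'.getD (t[p]'(by omega)) 0 + 1)).getD 'b' 0 =
        cntB t (p + 1) - cntB t (Lmin t c p) := by
      rw [PySem.Dict.getD_insert]
      by_cases hb : t[p]'(by omega) = 'b'
      · rw [if_pos hb.symm, hb, hdb, cntB_succ t p (by omega), if_pos hb]
        ring
      · rw [if_neg (fun he => hb he.symm), hdb, cntB_succ t p (by omega), if_neg hb]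
        ring
    have hcur1 : (if (t[p]'(by omega)) = 'b' then
        invv t (Lmin t c p) p +
          (d'.insert (t[p]'(by omega)) (d'.getD (t[p]'(by omega)) 0 + 1)).getD 'a' 0
        else invv t (Lmin t c p) p) = invv t (Lmin t c p) (p + 1) := by
      rw [invv_succ_r t (Lmin t c p) p (by omega)]
      by_cases hb : t[p]'(by omega) = 'b'
      · have hAa : cntA t (p + 1) = cntA t p := by
          rw [cntA_succ t p (by omega), hb]
          simp
        rw [if_pos hb, if_pos hb, hd1a, hAa]
      · rw [if_neg hb, if_neg hb]
        ring
    rw [show rudeStep cs c ((Lmin t c p : Int), bl, br, d', invv t (Lmin t c p) p) ((p : Nat) : Int) =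
        (match PySem.List.pyGet? cs ((p : Nat) : Int) with
         | none => (((Lmin t c p : Nat) : Int), bl, br, d', invv t (Lmin t c p) p)
         | some cyl =>
           let d1 := d'.insert cyl (d'.getD cyl 0 + 1)
           let cur1 := if cyl = 'b' then invv t (Lmin t c p) p + d1.getD 'a' 0
             else invv t (Lmin t c p) p
           if cur1 ≤ c then
             if br - bl ≤ ((p : Nat) : Int) - ((Lmin t c p : Nat) : Int) then
               (((Lmin t c p : Nat) : Int), ((Lmin t c p : Nat) : Int), ((p : Nat) : Int), d1, cur1)
             else (((Lmin t c p : Nat) : Int), bl, br, d1, cur1)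
           else
             match rudeShrink cs c (cs.length + 1) (((Lmin t c p : Nat) : Int), d1, cur1) with
             | (l2, d2, cur2) => (l2, bl, br, d2, cur2)) from rfl, hget]
    show ∃ bl' br' d'', (let d1 := d'.insert (t[p]'(by omega)) (d'.getD (t[p]'(by omega)) 0 + 1);
        let cur1 := if (t[p]'(by omega)) = 'b' then invv t (Lmin t c p) p + d1.getD 'a' 0
          else invv t (Lmin t c p) p;
        if cur1 ≤ c then
          if br - bl ≤ ((p : Nat) : Int) - ((Lmin t c p : Nat) : Int) then
            (((Lmin t c p : Nat) : Int), ((Lmin t c p : Nat) : Int), ((p : Nat) : Int), d1, cur1)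
          else (((Lmin t c p : Nat) : Int), bl, br, d1, cur1)
        else
          match rudeShrink cs c (cs.length + 1) (((Lmin t c p : Nat) : Int), d1, cur1) with
          | (l2, d2, cur2) => (l2, bl, br, d2, cur2)) = _ ∧ _ ∧ _ ∧ _
    simp only [hcur1]
    by_cases hok : invv t (Lmin t c p) (p + 1) ≤ c
    · have hLeq : Lmin t c (p + 1) = Lmin t c p :=
        le_antisymm (Lmin_le_of_valid t c (p + 1) (Lmin t c p) hok)
          (Lmin_mono t c p hc (by omega))
      rw [if_pos hok]
      by_cases hrec : br - bl ≤ ((p : Nat) : Int) - ((Lmin t c p : Nat) : Int)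
      · refine ⟨(Lmin t c p : Int), ((p : Nat) : Int),
          d'.insert (t[p]'(by omega)) (d'.getD (t[p]'(by omega)) 0 + 1), ?_, ?_, ?_, ?_⟩
        · rw [if_pos hrec, hLeq]
        · rw [Mbest_succ, hLeq, hbest.symm, max_eq_right (by omega)]
        · rw [hLeq]
          exact hd1a
        · rw [hLeq]
          exact hd1b
      · refine ⟨bl, br,
          d'.insert (t[p]'(by omega)) (d'.getD (t[p]'(by omega)) 0 + 1), ?_, ?_, ?_, ?_⟩
        · rw [if_neg hrec, hLeq]
        · rw [Mbest_succ, hLeq, hbest.symm, max_eq_left (by omega)]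
        · rw [hLeq]
          exact hd1a
        · rw [hLeq]
          exact hd1b
    · rw [if_neg hok]
      have hmono : Lmin t c p ≤ Lmin t c (p + 1) := Lmin_mono t c p hc (by omega)
      have hup : Lmin t c (p + 1) ≤ p := by
        have := Lmin_le_pred t c (p + 1) hc (by omega) (by omega)
        omega
      obtain ⟨d2, hsh, hd2a, hd2b⟩ := shrink_ok cs c N hN hc (p + 1) (by omega) (by omega)
        (cs.length + 1) (Lmin t c p) (d'.insert (t[p]'(by omega)) (d'.getD (t[p]'(by omega)) 0 + 1))
        hmono (by rw [← ht]; omega) hd1a hd1b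
      rw [hsh]
      have hlt : Lmin t c p < Lmin t c (p + 1) := by
        rcases Nat.lt_or_ge (Lmin t c p) (Lmin t c (p + 1)) with h | h
        · exact h
        · exfalso
          apply hok
          calc invv t (Lmin t c p) (p + 1) ≤ invv t (Lmin t c (p + 1)) (p + 1) :=
                invv_anti t h (by have := Lmin_le_self t c (p + 1); omega) (by omega)
            _ ≤ c := Lmin_valid t c (p + 1) hc (by omega) (by omega)
      have hp1 : 1 ≤ p := by omega
      have hMge : ((p - 1 : Nat) : Int) - ((Lmin t c (p - 1 + 1) : Nat) : Int) ≤ Mbest t c p :=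
        Mbest_ge t c p (p - 1) (by omega)
      rw [show p - 1 + 1 = p from by omega] at hMge
      have hcast1 : ((p - 1 : Nat) : Int) = (p : Int) - 1 := by
        push_cast [hp1]
        ring
      have hcastL : ((Lmin t c p : Nat) : Int) < ((Lmin t c (p + 1) : Nat) : Int) := by
        exact_mod_cast hlt
      refine ⟨bl, br, d2, rfl, ?_, hd2a, hd2b⟩
      rw [Mbest_succ, hbest.symm, max_eq_left (by omega)]

theorem rude_eq_Mbest (s : String) (n : Int) (c : Int) (h0 : 0 ≤ n)
    (h1 : n ≤ (s.toList.length : Int)) (hc : 0 ≤ c) :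
    rude s n c = Mbest (s.toList.take n.toNat) c n.toNat + 1 := by
  have hn : n = ((n.toNat : Nat) : Int) := (Int.toNat_of_nonneg h0).symm
  obtain ⟨bl, br, d', heq, hbest, -, -⟩ :=
    loop_ok s.toList c n.toNat (by omega) hc n.toNat le_rfl
  dsimp only [rude]
  rw [hn]
  simp only [Int.toNat_natCast]
  rw [heq]
  show br - bl + 1 = _
  rw [hbest]

-- the three prefix tables of Source B
theorem tables_ok (t : List Char) :
    ∀ k, k ≤ t.length →
      (t.take k).foldl tabStep ([0], [0], [0]) =
        ((List.range (k + 1)).map (fun i => cntA t i),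
         (List.range (k + 1)).map (fun i => cntB t i),
         (List.range (k + 1)).map (fun i => wsum t i)) := by
  intro k
  induction k with
  | zero =>
    intro _
    simp only [List.take_zero, List.foldl_nil, List.range_one, List.map_cons, List.map_nil]
    refine congrArg₂ Prod.mk ?_ (congrArg₂ Prod.mk ?_ ?_) <;> simp [cntA, cntB, wsum]
  | succ k ih =>
    intro hk1
    have hk : k < t.length := by omega
    rw [List.take_succ, List.getElem?_eq_getElem hk, Option.toList_some, List.foldl_append,
      ih (by omega), List.foldl_cons, List.foldl_nil]
    have hlast : ∀ g : Nat → Int,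
        PySem.List.pyGetD ((List.range (k + 1)).map (fun i => g i)) (-1) 0 = g k := by
      intro g
      rw [List.range_succ, List.map_append, List.map_singleton]
      exact PySem.List.pyGetD_neg_one_append_singleton _ _ _
    dsimp only [tabStep]
    rw [hlast (fun i => cntA t i), hlast (fun i => cntB t i), hlast (fun i => wsum t i),
      PySem.List.pyGetD_neg_one_append_singleton]
    rw [show List.range (k + 1 + 1) = List.range (k + 1) ++ [k + 1] from List.range_succ,
      List.map_append, List.map_append, List.map_append, List.map_singleton,
      List.map_singleton, List.map_singleton]
    refine congrArg₂ Prod.mk ?_ (congrArg₂ Prod.mk ?_ ?_)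
    · rw [cntA_succ t k hk]
    · rw [cntB_succ t k hk]
    · have hw : wsum t (k + 1) = wsum t k + (if t[k] = 'b' then cntA t k else 0) := by
        rw [show wsum t (k + 1) = wsum t k + (if t.getD k ' ' = 'b' then cntA t k else 0)
          from rfl, List.getD_eq_getElem t ' ' hk]
      rw [hw]
      by_cases hb : t[k] = 'b'
      · have ha : ¬ t[k] = 'a' := by rw [hb]; decide
        simp [ha, hb]
      · simp [hb]

theorem invB_ok (t : List Char) (l r : Int) (hl0 : 0 ≤ l) (hl1 : l ≤ (t.length : Int))
    (hr0 : 0 ≤ r) (hr1 : r ≤ (t.length : Int)) :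
    invB ((List.range (t.length + 1)).map (fun i => cntA t i))
         ((List.range (t.length + 1)).map (fun i => cntB t i))
         ((List.range (t.length + 1)).map (fun i => wsum t i)) l r =
      invv t l.toNat r.toNat := by
  have e : ∀ (g : Nat → Int) (i : Int), 0 ≤ i → i ≤ (t.length : Int) →
      PySem.List.pyGetD ((List.range (t.length + 1)).map (fun j => g j)) i 0 = g i.toNat := by
    intro g i hi0 hi1
    rw [PySem.List.pyGetD_of_nonneg _ _ hi0]
    exact PySem.List.getD_map_range g _ _ 0 (by omega)
  unfold invB invv
  rw [e _ l hl0 hl1, e _ r hr0 hr1, e _ l hl0 hl1, e _ r hr0 hr1, e _ l hl0 hl1]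

-- the binary search of Source B finds the least valid left endpoint
theorem bsearch_ok (t : List Char) (c : Int) (hc : 0 ≤ c) (r : Nat) (hr1 : 1 ≤ r)
    (hrN : r ≤ t.length) (p : Int → Int)
    (hp : ∀ m : Int, 0 ≤ m → m ≤ (r : Int) - 1 → p m = invv t m.toNat r) :
    ∀ (fuel : Nat) (lo hi : Int), 0 ≤ lo → lo ≤ (Lmin t c r : Int) →
      (Lmin t c r : Int) ≤ hi → hi ≤ (r : Int) - 1 → (hi - lo).toNat ≤ fuel →
      bsearchB p c lo hi fuel = (Lmin t c r : Int) := by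
  intro fuel
  induction fuel with
  | zero =>
    intro lo hi h0 h1 h2 h3 h4
    have : lo = (Lmin t c r : Int) := by omega
    rw [← this]
    rfl
  | succ fuel ih =>
    intro lo hi h0 h1 h2 h3 h4
    dsimp only [bsearchB]
    by_cases hlh : lo < hi
    · rw [if_pos hlh]
      have hmid := PySem.Int.floordiv_two_mid_bounds (le_of_lt hlh)
      have hmidlt : PySem.Int.floordiv (lo + hi) 2 < hi := by
        rw [PySem.Int.floordiv_lt_iff_lt_mul (by norm_num)]
        omega
      set mid := PySem.Int.floordiv (lo + hi) 2 with hmiddef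
      have hpm : p mid = invv t mid.toNat r := hp mid (by omega) (by omega)
      by_cases hv : p mid ≤ c
      · rw [if_pos hv]
        apply ih lo mid h0 h1 _ (by omega) (by omega)
        have := Lmin_le_of_valid t c r mid.toNat (by rw [← hpm]; exact hv)
        have h' : ((Lmin t c r : Nat) : Int) ≤ ((mid.toNat : Nat) : Int) := by exact_mod_cast this
        rw [Int.toNat_of_nonneg (by omega)] at h'
        exact h'
      · rw [if_neg hv]
        apply ih (mid + 1) hi _ _ h2 h3 (by omega)
        · omega
        · have hinv : c < invv t mid.toNat r := by
            rw [← hpm]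
            omega
          have hlt : mid.toNat < Lmin t c r := by
            rcases Nat.lt_or_ge mid.toNat (Lmin t c r) with h | h
            · exact h
            · exfalso
              apply absurd hinv
              push_neg
              calc invv t mid.toNat r ≤ invv t (Lmin t c r) r := by
                    apply invv_anti t h _ hrN
                    have : ((mid.toNat : Nat) : Int) = mid := Int.toNat_of_nonneg (by omega)
                    omega
                _ ≤ c := Lmin_valid t c r hc hr1 hrN
          have : ((mid.toNat : Nat) : Int) < ((Lmin t c r : Nat) : Int) := by exact_mod_cast hlt
          rw [Int.toNat_of_nonneg (by omega)] at this
          omega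
    · rw [if_neg hlh]
      omega

-- invariant of Source B's outer loop
theorem altloop_ok (t : List Char) (c : Int) (hc : 0 ≤ c) :
    ∀ k, k ≤ t.length →
      (PySem.List.pyRange 1 ((k : Int) + 1) 1).foldl
          (altStep ((List.range (t.length + 1)).map (fun i => cntA t i))
            ((List.range (t.length + 1)).map (fun i => cntB t i))
            ((List.range (t.length + 1)).map (fun i => wsum t i)) c) 1 =
        Mbest t c k + 1 := by
  intro k
  induction k with
  | zero =>
    intro _
    rw [show ((0 : Nat) : Int) + 1 = 1 from rfl, PySem.List.pyRange_one_eq_nil le_rfl]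
    simp [Mbest]
  | succ k ih =>
    intro hk1
    have hcast : ((k + 1 : Nat) : Int) + 1 = ((k : Int) + 1) + 1 := by push_cast; ring
    rw [hcast, PySem.List.pyRange_one_succ_right (show (1 : Int) ≤ (k : Int) + 1 by omega),
      List.foldl_append, ih (by omega), List.foldl_cons, List.foldl_nil]
    dsimp only [altStep]
    have hsub : (k : Int) + 1 - 1 = ((k : Nat) : Int) := by ring
    have hL : bsearchB
        (fun l => invB ((List.range (t.length + 1)).map (fun i => cntA t i))
          ((List.range (t.length + 1)).map (fun i => cntB t i))
          ((List.range (t.length + 1)).map (fun i => wsum t i)) l ((k : Int) + 1)) c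
        0 ((k : Int) + 1 - 1) ((k : Int) + 1 - 1).toNat = ((Lmin t c (k + 1) : Nat) : Int) := by
      rw [hsub, Int.toNat_natCast]
      have hp : ∀ m : Int, 0 ≤ m → m ≤ ((k + 1 : Nat) : Int) - 1 →
          invB ((List.range (t.length + 1)).map (fun i => cntA t i))
            ((List.range (t.length + 1)).map (fun i => cntB t i))
            ((List.range (t.length + 1)).map (fun i => wsum t i)) m ((k : Int) + 1) =
          invv t m.toNat (k + 1) := by
        intro m hm0 hm1
        have he := invB_ok t m ((k : Int) + 1) hm0 (by push_cast at hm1 ⊢; omega) (by omega)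
          (by push_cast; omega)
        rw [show ((k : Int) + 1).toNat = k + 1 from by omega] at he
        exact he
      have hhi : ((Lmin t c (k + 1) : Nat) : Int) ≤ ((k : Nat) : Int) := by
        exact_mod_cast Lmin_le_pred t c (k + 1) hc (by omega) (by omega)
      exact bsearch_ok t c hc (k + 1) (by omega) (by omega) _ hp k 0 ((k : Nat) : Int)
        le_rfl (by exact_mod_cast Nat.zero_le _) hhi (by push_cast; omega) (by omega)
    rw [hL, Mbest_succ]
    rcases max_cases (Mbest t c k) ((k : Int) - ((Lmin t c (k + 1) : Nat) : Int)) with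
      ⟨hm, hle⟩ | ⟨hm, hle⟩ <;> rw [hm] <;> split_ifs <;> omega

theorem rude_alt_eq_Mbest (s : String) (n : Int) (c : Int) (h0 : 0 ≤ n)
    (h1 : n ≤ (s.toList.length : Int)) (hc : 0 ≤ c) :
    rude_alt s n c = Mbest (s.toList.take n.toNat) c n.toNat + 1 := by
  dsimp only [rude_alt]
  rw [max_eq_right h0, PySem.List.slice_to s.toList h0]
  have htab := tables_ok (s.toList.take n.toNat) (s.toList.take n.toNat).length le_rfl
  rw [List.take_length] at htab
  rw [htab]
  have hlen : (s.toList.take n.toNat).length = n.toNat := by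
    rw [List.length_take, Nat.min_eq_left (by omega)]
  rw [PySem.List.len_eq]
  have halt := altloop_ok (s.toList.take n.toNat) c hc (s.toList.take n.toNat).length le_rfl
  have hM : Mbest (s.toList.take n.toNat) c n.toNat =
      Mbest (s.toList.take n.toNat) c (s.toList.take n.toNat).length := by
    rw [hlen]
  rw [hM]
  exact halt

theorem rude_zero (s : String) (n : Int) (c : Int) (hn : n ≤ 0) : rude s n c = 1 := by
  simp [rude, PySem.List.pyRange_one_eq_nil hn]

theorem rude_alt_zero (s : String) (n : Int) (c : Int) (hn : n ≤ 0) : rude_alt s n c = 1 := by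
  have hm : max 0 n = 0 := max_eq_left hn
  simp [rude_alt, hm, PySem.List.slice_to, PySem.List.pyRange_one_eq_nil]

-- ===== VERDICT (by name: the statement is the Claim_ definition above) =====
theorem rude_spec : Claim_equal_rude := by
  intro s n c _ hpre
  unfold Spec_rude
  obtain ⟨h1, hc⟩ := hpre
  rcases le_or_gt n 0 with hn0 | hpos
  · rw [rude_zero s n c hn0, rude_alt_zero s n c hn0]
  · have h0 : 0 ≤ n := le_of_lt hpos
    rcases hc with hc | hn0
    · rw [rude_eq_Mbest s n c h0 h1 hc, rude_alt_eq_Mbest s n c h0 h1 hc]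
    · omega
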